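-- pv_equiv track=rewrite | github.com/dungprolhvn/PTIT-codes | dsa/DSA11021.py | findAllLeaves
-- ===== SOURCE A (Python) =====
-- def findAllLeaves(preOrder, start, end):
--     """
--     Return all leaves of a binary search tree
--     """
--     if start > end:
--         return []
--     root = preOrder[start]
--     idx = start + 1
--     while idx <= end and preOrder[idx] < root:
--         idx += 1
--     left_leaves = findAllLeaves(preOrder, start + 1, idx - 1)
--     right_leaves = findAllLeaves(preOrder, idx, end)
--     if not left_leaves and not right_leaves:
--         return [root]
--     return left_leaves + right_leaves
-- ===== SOURCE B (Python) =====
-- def findAllLeaves(preOrder, start, end):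
--     """
--     Return all leaves of a binary search tree
--     """
--     leaves = []
--     stack = [(start, end)]
--     while stack:
--         s, e = stack.pop()
--         if s > e:
--             continue
--         if s == e:
--             leaves.append(preOrder[s])
--             continue
--         root = preOrder[s]
--         i = s + 1
--         while i <= e and preOrder[i] < root:
--             i += 1
--         stack.append((i, e))
--         stack.append((s + 1, i - 1))
--     return leaves
-- ===== Notes on version B (the rewrite author's own statement) =====
-- stated objective: alternative
-- what changed: Replaces A's recursion (which tests emptiness of the two recursively built child lists to detect a leaf) with an explicit worklist of index ranges and a direct single-index leaf test (s == e), accumulating leaves into one list instead of concatenating sublists.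
import Mathlib
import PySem

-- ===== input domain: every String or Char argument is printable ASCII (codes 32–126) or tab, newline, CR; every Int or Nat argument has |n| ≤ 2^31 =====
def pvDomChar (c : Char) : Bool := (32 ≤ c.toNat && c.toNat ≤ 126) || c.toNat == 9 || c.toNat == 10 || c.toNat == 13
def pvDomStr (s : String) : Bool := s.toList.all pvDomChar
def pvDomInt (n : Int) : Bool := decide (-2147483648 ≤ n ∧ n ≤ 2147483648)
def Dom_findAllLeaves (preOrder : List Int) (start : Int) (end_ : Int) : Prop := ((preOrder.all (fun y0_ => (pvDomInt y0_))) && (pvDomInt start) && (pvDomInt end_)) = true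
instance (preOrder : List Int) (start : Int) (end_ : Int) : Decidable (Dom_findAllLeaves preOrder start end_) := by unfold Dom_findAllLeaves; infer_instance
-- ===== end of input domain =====

-- B replaces A's recursion (which tests emptiness of the two recursively built child lists to detect
-- a leaf) by an explicit worklist of index ranges with a direct single-index leaf test; same cost.

-- ===== PORT A =====
-- the scan 'while idx <= end and preOrder[idx] < root: idx += 1' (same loop text in both Pythons);
-- the Nat argument is the fuel (e + 1 - i).toNat, encoding the bound 'i <= e' exactly: fuel 0 ↔ i > e
def pvScan (a : List Int) (root : Int) (fuel : Nat) (i : Int) : Int :=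
  match fuel with
  | 0 => i
  | fuel + 1 =>
    if (PySem.List.pyGet? a i).getD root < root then pvScan a root fuel (i + 1) else i

-- recursion of A with fuel = (e + 1 - s).toNat (= the range size, an upper bound on the depth)
def pvLeaves (a : List Int) (fuel : Nat) (s e : Int) : List Int :=
  match fuel with
  | 0 => []                        -- only reached with s > e (Python: 'if start > end: return []')
  | fuel + 1 =>
    if s > e then []
    else
      match PySem.List.pyGet? a s with
      | none => []                 -- Python raises IndexError here; excluded by Pre_
      | some root =>
        let idx := pvScan a root (e + 1 - (s + 1)).toNat (s + 1)
        let left_leaves := pvLeaves a fuel (s + 1) (idx - 1)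
        let right_leaves := pvLeaves a fuel idx e
        if left_leaves = [] ∧ right_leaves = [] then [root] else left_leaves ++ right_leaves

def findAllLeaves (preOrder : List Int) (start : Int) (end_ : Int) : List Int :=
  pvLeaves preOrder (end_ + 1 - start).toNat start end_

-- ===== PORT B =====
-- the while-stack loop of Source B (stack head = top of the Python stack); fuel bounds the number of
-- iterations (each range of size n is popped and expanded within 2*n + 1 iterations)
def pvLoop (a : List Int) (fuel : Nat) (stack : List (Int × Int)) (acc : List Int) : List Int :=
  match fuel with
  | 0 => acc
  | fuel + 1 =>
    match stack with
    | [] => acc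
    | (s, e) :: rest =>
      if s > e then pvLoop a fuel rest acc
      else if s = e then
        pvLoop a fuel rest (acc ++ (match PySem.List.pyGet? a s with
          | some v => [v]
          | none => []))           -- Python raises IndexError here; excluded by Pre_
      else
        match PySem.List.pyGet? a s with
        | none => pvLoop a fuel rest acc   -- Python raises IndexError here; excluded by Pre_
        | some root =>
          let i := pvScan a root (e + 1 - (s + 1)).toNat (s + 1)
          pvLoop a fuel ((s + 1, i - 1) :: (i, e) :: rest) acc

def findAllLeaves_alt (preOrder : List Int) (start : Int) (end_ : Int) : List Int :=
  pvLoop preOrder ((end_ - start + 1).toNat * 2 + 2) [(start, end_)] []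

-- ===== PRECONDITION & SPEC =====
-- Pre_ excludes exactly the inputs where Python A raises IndexError: a nonempty range whose
-- endpoints leave the list's index range [-len, len).
def Pre_findAllLeaves (preOrder : List Int) (start : Int) (end_ : Int) : Prop :=
  start > end_ ∨ (-(preOrder.length : Int) ≤ start ∧ end_ < preOrder.length)
instance (preOrder : List Int) (start : Int) (end_ : Int) : Decidable (Pre_findAllLeaves preOrder start end_) := by unfold Pre_findAllLeaves; infer_instance

def pvWitness_findAllLeaves : List Int × Int × Int := ([5, 3, 2, 4, 8, 7], 0, 5)

def Spec_findAllLeaves (preOrder : List Int) (start : Int) (end_ : Int) (out : List Int) : Prop := out = findAllLeaves_alt preOrder start end_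
instance (preOrder : List Int) (start : Int) (end_ : Int) (out : List Int) : Decidable (Spec_findAllLeaves preOrder start end_ out) := by unfold Spec_findAllLeaves; infer_instance

-- ===== CLAIM (what is proved, stated in full; the proofs are below) =====
def Claim_equal_findAllLeaves : Prop := ∀ (preOrder : List Int) (start : Int) (end_ : Int), Dom_findAllLeaves preOrder start end_ → Pre_findAllLeaves preOrder start end_ → Spec_findAllLeaves preOrder start end_ (findAllLeaves preOrder start end_)

-- ===== LEMMAS AND PROOFS =====

theorem pvGet_isSome (a : List Int) (s : Int) (h1 : -(a.length : Int) ≤ s) (h2 : s < a.length) :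
    ∃ v, PySem.List.pyGet? a s = some v := by
  rcases h : PySem.List.pyGet? a s with _ | v
  · rw [PySem.List.pyGet?_eq_none_iff] at h
    exact absurd ⟨h1, h2⟩ h
  · exact ⟨v, rfl⟩

theorem pvScan_bounds (a : List Int) (root : Int) :
    ∀ (fuel : Nat) (i : Int), i ≤ pvScan a root fuel i ∧ pvScan a root fuel i ≤ i + fuel := by
  intro fuel
  induction fuel with
  | zero => intro i; simp [pvScan]
  | succ n ih =>
    intro i
    rw [pvScan]
    split
    · have := ih (i + 1); omega
    · omega

-- the value of pvLeaves does not depend on the fuel, as long as it covers the range size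
theorem pvLeaves_congr (a : List Int) :
    ∀ (f1 : Nat) (s e : Int) (f2 : Nat), (e + 1 - s).toNat ≤ f1 → (e + 1 - s).toNat ≤ f2 →
      pvLeaves a f1 s e = pvLeaves a f2 s e := by
  intro f1
  induction f1 with
  | zero =>
    intro s e f2 h1 _
    have hse : s > e := by omega
    cases f2 with
    | zero => rfl
    | succ f2 => rw [pvLeaves, pvLeaves, if_pos hse]
  | succ f1 ih =>
    intro s e f2 h1 h2
    cases f2 with
    | zero =>
      have hse : s > e := by omega
      rw [pvLeaves, pvLeaves, if_pos hse]
    | succ f2 =>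
      rw [pvLeaves, pvLeaves]
      by_cases hse : s > e
      · rw [if_pos hse, if_pos hse]
      · rw [if_neg hse, if_neg hse]
        rcases hget : PySem.List.pyGet? a s with _ | root
        · rfl
        · simp only []
          have hb := pvScan_bounds a root (e + 1 - (s + 1)).toNat (s + 1)
          rw [ih (s + 1) (pvScan a root (e + 1 - (s + 1)).toNat (s + 1) - 1) f2 (by omega) (by omega)]
          rw [ih (pvScan a root (e + 1 - (s + 1)).toNat (s + 1)) e f2 (by omega) (by omega)]

theorem pvLeaves_to_f (a : List Int) (fuel : Nat) (s e : Int) (h : (e + 1 - s).toNat ≤ fuel) :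
    pvLeaves a fuel s e = findAllLeaves a s e :=
  pvLeaves_congr a fuel s e (e + 1 - s).toNat h (le_refl _)

-- on a valid nonempty range A never returns []
theorem findAllLeaves_ne_nil (a : List Int) (s e : Int)
    (h1 : -(a.length : Int) ≤ s) (h2 : e < a.length) (hse : s ≤ e) :
    findAllLeaves a s e ≠ [] := by
  unfold findAllLeaves
  obtain ⟨fl, hfl⟩ : ∃ fl, (e + 1 - s).toNat = fl + 1 := ⟨(e - s).toNat, by omega⟩
  rw [hfl, pvLeaves, if_neg (by omega)]
  obtain ⟨v, hv⟩ := pvGet_isSome a s h1 (by omega)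
  rw [hv]
  simp only []
  split
  · simp
  · rename_i hne
    intro hnil
    rcases List.append_eq_nil_iff.mp hnil with ⟨hL, hR⟩
    exact hne ⟨hL, hR⟩

-- a singleton range yields exactly the root
theorem findAllLeaves_single (a : List Int) (s : Int) (v : Int)
    (hv : PySem.List.pyGet? a s = some v) :
    findAllLeaves a s s = [v] := by
  unfold findAllLeaves
  have h1 : (s + 1 - s).toNat = 1 := by omega
  have h0 : (s + 1 - (s + 1)).toNat = 0 := by omega
  rw [h1, pvLeaves, if_neg (by omega), hv]
  simp only [h0]
  rw [show pvScan a v 0 (s + 1) = s + 1 from rfl]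
  rw [show pvLeaves a 0 (s + 1) (s + 1 - 1) = [] from rfl,
      show pvLeaves a 0 (s + 1) s = [] from rfl]
  simp

-- total weight of a worklist: an upper bound on the loop iterations it still causes
def pvW (stack : List (Int × Int)) : Nat :=
  (stack.map (fun p => (p.2 - p.1 + 1).toNat * 2 + 1)).sum

-- the value of pvLoop does not depend on the fuel, as long as it covers the stack weight
theorem pvLoop_congr (a : List Int) :
    ∀ (f1 : Nat) (stack : List (Int × Int)) (acc : List Int) (f2 : Nat),
      pvW stack ≤ f1 → pvW stack ≤ f2 → pvLoop a f1 stack acc = pvLoop a f2 stack acc := by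
  intro f1
  induction f1 with
  | zero =>
    intro stack acc f2 h1 _
    cases stack with
    | nil => cases f2 <;> rfl
    | cons p rest => simp [pvW, List.map_cons, List.sum_cons] at h1
  | succ f1 ih =>
    intro stack acc f2 h1 h2
    cases stack with
    | nil => cases f2 <;> rfl
    | cons p rest =>
      obtain ⟨s, e⟩ := p
      have hw : pvW ((s, e) :: rest) = (e - s + 1).toNat * 2 + 1 + pvW rest := by
        simp [pvW, List.map_cons, List.sum_cons]
      cases f2 with
      | zero => rw [hw] at h2; omega
      | succ f2 =>
        rw [pvLoop, pvLoop]
        by_cases hse : s > e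
        · rw [if_pos hse, if_pos hse, ih rest acc f2 (by rw [hw] at h1; omega) (by rw [hw] at h2; omega)]
        · rw [if_neg hse, if_neg hse]
          by_cases heq : s = e
          · rw [if_pos heq, if_pos heq,
                ih rest _ f2 (by rw [hw] at h1; omega) (by rw [hw] at h2; omega)]
          · rw [if_neg heq, if_neg heq]
            rcases hget : PySem.List.pyGet? a s with _ | root
            · exact ih rest acc f2 (by rw [hw] at h1; omega) (by rw [hw] at h2; omega)
            · simp only []
              have hb := pvScan_bounds a root (e + 1 - (s + 1)).toNat (s + 1)
              apply ih
              · simp only [pvW, List.map_cons, List.sum_cons] at h1 ⊢; omega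
              · simp only [pvW, List.map_cons, List.sum_cons] at h2 ⊢; omega

-- main invariant: popping one range appends exactly A's result for that range
theorem pvLoop_step (a : List Int) :
    ∀ n : Nat, ∀ s e : Int, (e + 1 - s).toNat ≤ n →
      (s > e ∨ (-(a.length : Int) ≤ s ∧ e < a.length)) →
      ∀ (rest : List (Int × Int)) (acc : List Int) (f1 f2 : Nat),
        pvW ((s, e) :: rest) ≤ f1 → pvW rest ≤ f2 →
        pvLoop a f1 ((s, e) :: rest) acc = pvLoop a f2 rest (acc ++ findAllLeaves a s e) := by
  intro n
  induction n with
  | zero =>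
    intro s e hn _ rest acc f1 f2 h1 h2
    have hse : s > e := by omega
    have hw : pvW ((s, e) :: rest) = (e - s + 1).toNat * 2 + 1 + pvW rest := by
      simp [pvW, List.map_cons, List.sum_cons]
    obtain ⟨f1', hf1⟩ : ∃ k, f1 = k + 1 := ⟨f1 - 1, by omega⟩
    subst hf1
    rw [pvLoop, if_pos hse]
    have hA : findAllLeaves a s e = [] := by
      unfold findAllLeaves
      rw [show (e + 1 - s).toNat = 0 by omega]
      rfl
    rw [hA, List.append_nil]
    exact pvLoop_congr a f1' rest acc f2 (by omega) h2
  | succ n ih =>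
    intro s e hn hpre rest acc f1 f2 h1 h2
    have hw : pvW ((s, e) :: rest) = (e - s + 1).toNat * 2 + 1 + pvW rest := by
      simp [pvW, List.map_cons, List.sum_cons]
    obtain ⟨f1', hf1⟩ : ∃ k, f1 = k + 1 := ⟨f1 - 1, by omega⟩
    subst hf1
    by_cases hse : s > e
    · rw [pvLoop, if_pos hse]
      have hA : findAllLeaves a s e = [] := by
        unfold findAllLeaves
        rw [show (e + 1 - s).toNat = 0 by omega]
        rfl
      rw [hA, List.append_nil]
      exact pvLoop_congr a f1' rest acc f2 (by omega) h2
    · have hval : -(a.length : Int) ≤ s ∧ e < a.length := by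
        rcases hpre with h | h
        · omega
        · exact h
      obtain ⟨v, hv⟩ := pvGet_isSome a s hval.1 (by omega)
      by_cases heq : s = e
      · subst heq
        rw [pvLoop, if_neg hse, if_pos rfl, hv, findAllLeaves_single a s v hv]
        exact pvLoop_congr a f1' rest _ f2 (by omega) h2
      · -- s < e : both children
        have hslt : s < e := by omega
        have hb := pvScan_bounds a v (e + 1 - (s + 1)).toNat (s + 1)
        have hnb : ¬ (findAllLeaves a (s + 1) (pvScan a v (e + 1 - (s + 1)).toNat (s + 1) - 1) = [] ∧
                      findAllLeaves a (pvScan a v (e + 1 - (s + 1)).toNat (s + 1)) e = []) := by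
          rintro ⟨hL, hR⟩
          by_cases hi : pvScan a v (e + 1 - (s + 1)).toNat (s + 1) = s + 1
          · exact findAllLeaves_ne_nil a (s + 1) e (by omega) (by omega) (by omega) (hi ▸ hR)
          · exact findAllLeaves_ne_nil a (s + 1) (pvScan a v (e + 1 - (s + 1)).toNat (s + 1) - 1)
              (by omega) (by omega) (by omega) hL
        have hA : findAllLeaves a s e =
            findAllLeaves a (s + 1) (pvScan a v (e + 1 - (s + 1)).toNat (s + 1) - 1) ++
              findAllLeaves a (pvScan a v (e + 1 - (s + 1)).toNat (s + 1)) e := by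
          conv_lhs => unfold findAllLeaves
          obtain ⟨fl, hfl⟩ : ∃ fl, (e + 1 - s).toNat = fl + 1 := ⟨(e - s).toNat, by omega⟩
          rw [hfl, pvLeaves, if_neg hse, hv]
          simp only []
          rw [pvLeaves_to_f a fl (s + 1) (pvScan a v (e + 1 - (s + 1)).toNat (s + 1) - 1) (by omega)]
          rw [pvLeaves_to_f a fl (pvScan a v (e + 1 - (s + 1)).toNat (s + 1)) e (by omega)]
          rw [if_neg hnb]
        rw [pvLoop, if_neg hse, if_neg heq, hv]
        simp only []
        rw [ih (s + 1) (pvScan a v (e + 1 - (s + 1)).toNat (s + 1) - 1) (by omega)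
              (Or.inr ⟨by omega, by omega⟩) _ acc f1'
              ((pvScan a v (e + 1 - (s + 1)).toNat (s + 1), e) :: rest |> pvW)
              (by simp only [pvW, List.map_cons, List.sum_cons] at h1 ⊢; omega) (le_refl _)]
        rw [ih (pvScan a v (e + 1 - (s + 1)).toNat (s + 1)) e (by omega)
              (Or.inr ⟨by omega, by omega⟩) rest _ _ f2 (le_refl _) h2]
        rw [hA, List.append_assoc]

-- ===== VERDICT (by name: the statement is the Claim_ definition above) =====
theorem findAllLeaves_spec : Claim_equal_findAllLeaves := by
  intro preOrder start end_ _hdom hpre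
  unfold Spec_findAllLeaves findAllLeaves_alt
  rw [pvLoop_step preOrder (end_ + 1 - start).toNat start end_ (le_refl _) hpre [] []
        ((end_ - start + 1).toNat * 2 + 2) 0
        (by simp [pvW, List.map_cons, List.sum_cons]) (by simp [pvW])]
  rfl
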